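-- pv_equiv track=rewrite | github.com/suraj548/Interview-prep-journal | LinkedList/basic-iq.py | count_chars_in_word
-- ===== SOURCE A (Python) =====
-- def count_chars_in_word(str_value):
--     char_dict = {}
--     char_str_list = []
--     for i in str_value:
--         char_dict.setdefault(i, 0)
--
--     for j in str_value:
--         char_dict[j] += 1
--
--     for key, value in char_dict.items():
--         char_str_list.append(key)
--         char_str_list.append(value)
--
--     str_value_list = [str(c) for c in char_str_list]
--     return ''.join(str_value_list)
-- ===== SOURCE B (Python) =====
-- def count_chars_in_word(str_value):
--     if not str_value:
--         return ''
--     ch = str_value[0]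
--     rest = str_value.replace(ch, '')
--     return ch + str(len(str_value) - len(rest)) + count_chars_in_word(rest)
-- ===== Notes on version B (the rewrite author's own statement) =====
-- stated objective: alternative
-- what changed: Replaces A's three staged dict passes (setdefault registration, increment tally, items emission) with a recursive peel: take the first character, obtain its count as the length lost by deleting all its occurrences with str.replace, and recurse on the shrunken remainder, so no counting structure is maintained at all.
import Mathlib
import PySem

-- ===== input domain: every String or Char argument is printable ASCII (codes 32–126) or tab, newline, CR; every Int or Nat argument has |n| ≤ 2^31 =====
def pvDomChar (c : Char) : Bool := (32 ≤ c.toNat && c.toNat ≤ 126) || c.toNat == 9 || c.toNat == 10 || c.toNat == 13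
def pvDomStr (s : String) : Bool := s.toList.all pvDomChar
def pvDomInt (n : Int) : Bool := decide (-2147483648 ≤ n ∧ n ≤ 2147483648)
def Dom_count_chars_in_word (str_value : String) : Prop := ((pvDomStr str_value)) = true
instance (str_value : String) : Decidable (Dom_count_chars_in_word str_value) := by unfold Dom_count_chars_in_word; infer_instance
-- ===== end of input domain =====

-- B replaces A's dict-accumulation passes with a recursive peel: count the head's occurrences by
-- deleting them (str.replace) and recursing on the shrunken remainder; objective: alternative.

-- ===== PORT A =====
-- A's char_str_list mixes chars and ints, so it is ported as List (Char ⊕ Int);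
-- str(c) on each element becomes the match in str_value_list.
-- In the second loop 'char_dict[j] += 1' the key j is always present (inserted by the first
-- loop), so Dict.modify with default 0 is exact here.
def count_chars_in_word (str_value : String) : String :=
  let char_dict : PySem.Dict Char Int :=
    str_value.toList.foldl (fun d i => d.setdefault i 0) PySem.Dict.empty
  let char_dict :=
    str_value.toList.foldl (fun d j => d.modify j 0 (· + 1)) char_dict
  let char_str_list : List (Char ⊕ Int) :=
    char_dict.items.foldl (fun acc kv => (acc ++ [Sum.inl kv.1]) ++ [Sum.inr kv.2]) []
  let str_value_list := char_str_list.map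
    (fun c => match c with
      | Sum.inl ch => String.singleton ch
      | Sum.inr n => PySem.Int.toStr n)
  PySem.Str.join "" str_value_list

-- ===== PORT B =====
-- termination fact the port cites: replacing the head char by '' strictly shrinks the list
theorem replace_go_filter (c : Char) (l : List Char) (fuel : Nat) (acc : List Char)
    (h : l.length ≤ fuel) :
    PySem.Chars.replace.go [c] [] fuel l acc = acc.reverse ++ l.filter (fun x => x != c) := by
  induction l generalizing fuel acc with
  | nil => cases fuel <;> simp [PySem.Chars.replace.go]
  | cons x t ih =>
      cases fuel with
      | zero => simp at h
      | succ fuel =>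
        have ht : t.length ≤ fuel := by simpa using h
        by_cases hx : c = x
        · subst hx
          have hstep : PySem.Chars.replace.go [c] [] (fuel + 1) (c :: t) acc
              = PySem.Chars.replace.go [c] [] fuel t acc := by
            simp [PySem.Chars.replace.go, List.isPrefixOf]
          rw [hstep, ih _ _ ht]
          simp
        · have hbe : (c == x) = false := by simp [hx]
          have hbx : (x != c) = true := by simp [bne]; exact fun h' => hx h'.symm
          simp only [PySem.Chars.replace.go, List.isPrefixOf, hbe, Bool.false_and,
            Bool.false_eq_true, if_neg, not_false_iff]
          rw [ih _ _ ht]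
          simp [hbx]

theorem replace_singleton (c : Char) (l : List Char) :
    PySem.Chars.replace l [c] [] = l.filter (fun x => x != c) := by
  have h := replace_go_filter c l l.length [] le_rfl
  simp only [List.reverse_nil, List.nil_append] at h
  simpa [PySem.Chars.replace] using h

theorem replace_head_length_lt (c : Char) (t : List Char) :
    (PySem.Chars.replace (c :: t) [c] []).length < (c :: t).length := by
  rw [replace_singleton]
  simp only [List.filter_cons, bne_self_eq_false, Bool.false_eq_true, if_neg, not_false_iff]
  have := List.length_filter_le (fun x => x != c) t
  simp only [List.length_cons]
  omega

-- the recursion of Source B, on the string's character list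
def countCharsGo : List Char → String
  | [] => ""
  | c :: t =>
      let rest := PySem.Chars.replace (c :: t) [c] []
      String.singleton c ++
        PySem.Int.toStr (((c :: t).length : Int) - (rest.length : Int)) ++
        countCharsGo rest
  termination_by l => l.length
  decreasing_by exact replace_head_length_lt c t

def count_chars_in_word_alt (str_value : String) : String :=
  countCharsGo str_value.toList

-- ===== PRECONDITION & SPEC =====
def Spec_count_chars_in_word (str_value : String) (out : String) : Prop := out = count_chars_in_word_alt str_value
instance (str_value : String) (out : String) : Decidable (Spec_count_chars_in_word str_value out) := by unfold Spec_count_chars_in_word; infer_instance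

-- ===== CLAIM (what is proved, stated in full; the proofs are below) =====
def Claim_equal_count_chars_in_word : Prop := ∀ (str_value : String), Dom_count_chars_in_word str_value → Spec_count_chars_in_word str_value (count_chars_in_word str_value)

-- ===== LEMMAS AND PROOFS =====

-- keys of the setdefault loop: ordered union of the old keys with the scanned list
theorem keys_foldl_setdefault (L : List Char) (d : PySem.Dict Char Int) :
    (L.foldl (fun d i => d.setdefault i 0) d).keys = PySem.Set.update d.keys L := by
  induction L generalizing d with
  | nil => simp [PySem.Set.update]
  | cons x xs ih =>
      rw [List.foldl_cons, ih, PySem.Set.update_cons]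
      congr 1
      rw [PySem.Dict.keys_setdefault]
      simp [PySem.Set.add, PySem.Set.contains, PySem.Dict.contains_eq_decide_mem_keys]

-- values after the setdefault-0 loop are all 0 (w.r.t. default 0)
theorem getD_foldl_setdefault (L : List Char) (d : PySem.Dict Char Int)
    (h : ∀ k, d.getD k 0 = 0) :
    ∀ k, (L.foldl (fun d i => d.setdefault i 0) d).getD k 0 = 0 := by
  induction L generalizing d with
  | nil => simpa using h
  | cons x xs ih =>
      rw [List.foldl_cons]
      refine ih _ (fun k => ?_)
      by_cases hk : k = x
      · subst hk; rw [PySem.Dict.getD_setdefault_self]; exact h _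
      · rw [PySem.Dict.getD_eq_get?_getD, PySem.Dict.get?_setdefault_of_ne _ _ hk,
          ← PySem.Dict.getD_eq_get?_getD]; exact h k

-- updating a set with elements it already has changes nothing
theorem set_update_self (s : PySem.Set Char) (L : List Char) (h : ∀ x ∈ L, x ∈ s) :
    PySem.Set.update s L = s := by
  rw [PySem.Set.update_eq_append_filter]
  have : List.filter (fun y => !s.contains y) (PySem.Set.ofList L) = [] := by
    rw [List.filter_eq_nil_iff]
    intro a ha
    have : a ∈ s := h a ((PySem.Set.mem_ofList L a).mp ha)
    simp [PySem.Set.contains, this]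
  rw [this, List.append_nil]

-- the dict A builds has items  (k, count k)  over the distinct chars in order
theorem items_A_dict (L : List Char) :
    ((L.foldl (fun d j => d.modify j (0 : Int) (· + 1))
        (L.foldl (fun d i => d.setdefault i (0 : Int)) PySem.Dict.empty)).items)
      = (PySem.Set.ofList L).map (fun k => (k, (L.count k : Int))) := by
  have hk1 : (L.foldl (fun d i => d.setdefault i (0 : Int)) PySem.Dict.empty).keys
      = PySem.Set.ofList L := by
    rw [keys_foldl_setdefault, PySem.Dict.keys_empty, PySem.Set.update_nil_left]
  have hk2 : (L.foldl (fun d j => d.modify j (0 : Int) (· + 1))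
      (L.foldl (fun d i => d.setdefault i (0 : Int)) PySem.Dict.empty)).keys
      = PySem.Set.ofList L := by
    rw [PySem.Dict.keys_foldl_modify L (0 : Int) (fun _ _ => (· + 1)), hk1]
    exact set_update_self _ _ (fun x hx => (PySem.Set.mem_ofList L x).mpr hx)
  have hnd := hk2 ▸ PySem.Set.nodup_ofList L
  have hv : ∀ k, (L.foldl (fun d j => d.modify j (0 : Int) (· + 1))
      (L.foldl (fun d i => d.setdefault i (0 : Int)) PySem.Dict.empty)).getD k 0
      = (L.count k : Int) := by
    intro k
    rw [PySem.Dict.getD_foldl_modify_add_one,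
      getD_foldl_setdefault L PySem.Dict.empty (fun k => PySem.Dict.getD_empty k 0) k]
    ring
  rw [PySem.Dict.items_eq_map_keys _ hnd 0, hk2]
  exact List.map_congr_left (fun k _ => by rw [hv k])

-- join with empty separator peels off the head
theorem join_empty_cons (a : String) (l : List String) :
    PySem.Str.join "" (a :: l) = a ++ PySem.Str.join "" l := by
  rw [← String.toList_inj]
  cases l with
  | nil =>
      simp [PySem.Str.toList_join, PySem.Chars.join_singleton]
  | cons b bs =>
      simp [PySem.Str.toList_join, PySem.Chars.join_cons_cons]

-- A's append-append loop over the items list, as a flatMap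
theorem foldl_pairs (l : List (Char × Int)) (acc : List (Char ⊕ Int)) :
    l.foldl (fun acc kv => acc ++ [Sum.inl kv.1, Sum.inr kv.2]) acc
      = acc ++ l.flatMap (fun kv => [Sum.inl kv.1, Sum.inr kv.2]) := by
  induction l generalizing acc with
  | nil => simp
  | cons p ps ih => simp [ih]

-- the alternating ⊕-list joined equals the per-character concatenations joined
theorem join_flatMap_pairs (cnt : Char → Int) (l : List Char) :
    PySem.Str.join ""
      ((l.flatMap (fun k => [Sum.inl k, Sum.inr (cnt k)])).map
        (fun c => match c with
          | Sum.inl ch => String.singleton ch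
          | Sum.inr n => PySem.Int.toStr n))
      = PySem.Str.join "" (l.map (fun ch => String.singleton ch ++ PySem.Int.toStr (cnt ch))) := by
  induction l with
  | nil => rfl
  | cons x xs ih =>
      simp only [List.flatMap_cons, List.map_cons, List.cons_append, List.nil_append]
      rw [join_empty_cons, join_empty_cons, ih, join_empty_cons, String.append_assoc]

-- B-side: folding Set.add over elements equal to c is a no-op once c is in the accumulator
theorem foldl_add_filter_of_mem (c : Char) (L : List Char) (s : PySem.Set Char) (hc : c ∈ s) :
    L.foldl PySem.Set.add s = (L.filter (fun x => x != c)).foldl PySem.Set.add s := by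
  induction L generalizing s with
  | nil => rfl
  | cons x t ih =>
      by_cases hx : x = c
      · subst hx
        have : PySem.Set.add s x = s := by
          simp [PySem.Set.add, PySem.Set.contains, hc]
        simp only [List.foldl_cons, List.filter_cons, bne_self_eq_false,
          Bool.false_eq_true, if_neg, not_false_iff, this]
        exact ih s hc
      · have : (x != c) = true := by simp [bne, hx]
        simp only [List.foldl_cons, List.filter_cons, this, if_pos]
        exact ih _ (by simp [PySem.Set.add]; split <;> simp [hc])

-- B-side: folding Set.add over a list avoiding c commutes with a c-headed accumulator
theorem foldl_add_cons_of_not_mem (c : Char) (L : List Char) (s : List Char)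
    (h : ∀ x ∈ L, x ≠ c) :
    L.foldl PySem.Set.add (c :: s) = c :: L.foldl PySem.Set.add s := by
  induction L generalizing s with
  | nil => rfl
  | cons x t ih =>
      have hx : x ≠ c := h x (by simp)
      have hcont : PySem.Set.contains (c :: s) x = PySem.Set.contains s x := by
        simp [PySem.Set.contains, hx]
      have hadd : PySem.Set.add (c :: s) x = c :: PySem.Set.add s x := by
        simp only [PySem.Set.add, hcont]
        split <;> simp
      rw [List.foldl_cons, List.foldl_cons, hadd, ih _ (fun y hy => h y (by simp [hy]))]

-- distinct chars of c :: t in first-appearance order: c, then the distinct chars of t with c deleted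
theorem ofList_cons_filter (c : Char) (t : List Char) :
    PySem.Set.ofList (c :: t) = c :: PySem.Set.ofList (t.filter (fun x => x != c)) := by
  unfold PySem.Set.ofList
  rw [List.foldl_cons]
  have hadd : PySem.Set.add (PySem.Set.empty : PySem.Set Char) c = [c] := by
    simp [PySem.Set.add, PySem.Set.empty, PySem.Set.contains]
  rw [hadd, foldl_add_filter_of_mem c t [c] (by simp)]
  exact foldl_add_cons_of_not_mem c _ []
    (fun x hx => by simpa [bne] using (List.of_mem_filter hx))

-- empty join is the empty string
theorem join_empty_nil : PySem.Str.join "" ([] : List String) = "" := by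
  rw [← String.toList_inj]; simp [PySem.Str.toList_join, PySem.Chars.join_nil]

-- count of the head = length lost by deleting it
theorem count_head_eq_length_sub (c : Char) (t : List Char) :
    ((c :: t).length : Int) - ((t.filter (fun x => x != c)).length : Int)
      = ((c :: t).count c : Int) := by
  have h1 : (t.filter (fun x => x != c)).length + t.count c = t.length := by
    induction t with
    | nil => rfl
    | cons x xs ih =>
        by_cases h : x = c
        · subst h; simp only [List.filter_cons, bne_self_eq_false, Bool.false_eq_true, if_neg,
            not_false_iff, List.count_cons_self, List.length_cons]; omega
        · have hb : (x != c) = true := by simp [bne, h]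
          simp only [List.filter_cons, hb, if_pos, List.length_cons,
            List.count_cons, beq_iff_eq, h, if_neg, not_false_iff]
          omega
  have h2 : (c :: t).count c = t.count c + 1 := by simp
  rw [h2]
  simp only [List.length_cons]
  push_cast
  omega

-- counts of the surviving characters are unchanged by deleting c
theorem count_filter_ne (c k : Char) (t : List Char) (h : k ≠ c) :
    (t.filter (fun x => x != c)).count k = (c :: t).count k := by
  rw [List.count_filter (by simp [bne, h])]
  simp [Ne.symm h]

-- B's recursion computes the same join of per-distinct-character blocks as A
theorem countCharsGo_eq (n : Nat) : ∀ (L : List Char), L.length ≤ n →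
    countCharsGo L = PySem.Str.join ""
      ((PySem.Set.ofList L).map
        (fun ch => String.singleton ch ++ PySem.Int.toStr (L.count ch : Int))) := by
  induction n with
  | zero =>
      intro L hL
      have : L = [] := List.eq_nil_of_length_eq_zero (Nat.le_zero.mp hL)
      subst this
      rw [countCharsGo, join_empty_nil.symm]
      rfl
  | succ n ih =>
      intro L hL
      cases L with
      | nil =>
          rw [countCharsGo, join_empty_nil.symm]
          rfl
      | cons c t =>
          have hrepl : PySem.Chars.replace (c :: t) [c] [] = t.filter (fun x => x != c) := by
            rw [replace_singleton]
            simp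
          have hlen : (t.filter (fun x => x != c)).length ≤ n := by
            have := List.length_filter_le (fun x => x != c) t
            have ht : t.length ≤ n := by simpa using hL
            omega
          rw [countCharsGo, hrepl, ih _ hlen, ofList_cons_filter, List.map_cons,
            join_empty_cons, count_head_eq_length_sub c t]
          have hmap : List.map
              (fun ch => String.singleton ch ++
                PySem.Int.toStr (((t.filter (fun x => x != c)).count ch : Int)))
              (PySem.Set.ofList (t.filter (fun x => x != c)))
            = List.map
              (fun ch => String.singleton ch ++ PySem.Int.toStr (((c :: t).count ch : Int)))
              (PySem.Set.ofList (t.filter (fun x => x != c))) := by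
            refine List.map_congr_left (fun k hk => ?_)
            have hkc : k ≠ c := by
              have hm := (PySem.Set.mem_ofList _ k).mp hk
              have := List.of_mem_filter hm
              simpa [bne] using this
            rw [count_filter_ne c k t hkc]
          rw [hmap, String.append_assoc]

-- ===== VERDICT (by name: the statement is the Claim_ definition above) =====
theorem count_chars_in_word_spec : Claim_equal_count_chars_in_word := by
  intro s _
  show count_chars_in_word s = count_chars_in_word_alt s
  unfold count_chars_in_word count_chars_in_word_alt
  simp only [List.append_assoc, List.singleton_append]
  rw [foldl_pairs, items_A_dict s.toList, List.flatMap_map, List.nil_append,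
    join_flatMap_pairs (fun k => (s.toList.count k : Int)) (PySem.Set.ofList s.toList)]
  exact (countCharsGo_eq s.toList.length s.toList le_rfl).symm
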